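-- pv_equiv track=rewrite | github.com/kimnamjun/CodingTest | 프로그래머스/월간 코드 챌린지/시즌2/lvl3 모두 0으로 만들기.py | solution
-- ===== SOURCE A (Python) =====
-- def solution(a, edges):
--     if sum(a):
--         return -1
--
--     nodes = [[i, list(), -1, -1] for i in a]  # weight, linked_nodes, depth, parent
--     for n1, n2 in edges:
--         nodes[n1][1].append(n2)
--         nodes[n2][1].append(n1)
--
--     nodes[0][2] = 0
--     stack = [0]
--     while stack:
--         top = stack.pop()
--         for inode in nodes[top][1]:
--             if nodes[inode][2] == -1:
--                 nodes[inode][2] = nodes[top][2] + 1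
--                 nodes[inode][3] = top
--                 stack.append(inode)
--
--     for idx, (weight, children, depth, parent) in enumerate(nodes):
--         if parent != -1:
--             nodes[idx][1].remove(parent)
--
--     def calc(inode):
--         ret = 0
--         for child in nodes[inode][1]:
--             ret += calc(child)
--         if nodes[inode][3] != -1:
--             nodes[nodes[inode][3]][0] += nodes[inode][0]
--         ret += abs(nodes[inode][0])
--         return ret
--
--     return calc(0)
-- ===== SOURCE B (Python) =====
-- def solution(a, edges):
--     if sum(a):
--         return -1
--     n = len(a)
--     adj = [[] for _ in range(n)]
--     for n1, n2 in edges: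
--         adj[n1].append(n2)
--         adj[n2].append(n1)
--     parent = [-1] * n
--     visited = [False] * n
--     visited[0] = True
--     order = []
--     stack = [0]
--     while stack:
--         v = stack.pop()
--         order.append(v)
--         for u in adj[v]:
--             if not visited[u]:
--                 visited[u] = True
--                 parent[u] = v
--                 stack.append(u)
--     weight = a[:]
--     ans = 0
--     for v in reversed(order):
--         ans += abs(weight[v])
--         p = parent[v]
--         if p != -1:
--             weight[p] += weight[v]
--     return ans
-- ===== Notes on version B (the rewrite author's own statement) =====
-- stated objective: simpler
-- what changed: B replaces A's per-node record lists, separate parent-removal pass and recursive subtree computation with one iterative DFS that records visitation order, followed by a single reverse-order sweep that accumulates each node's weight into its parent and sums absolute values (no recursion, no adjacency pruning).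
-- outside the precondition, e.g. on solution([0, 0, 0, 0, 0], [(0, 1), (2, 3), (3, 4), (4, 2)]): A returns 0, B returns 0; on solution([1, -1], [(0, -1)]): A returns 1, B returns 1
import Mathlib
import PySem

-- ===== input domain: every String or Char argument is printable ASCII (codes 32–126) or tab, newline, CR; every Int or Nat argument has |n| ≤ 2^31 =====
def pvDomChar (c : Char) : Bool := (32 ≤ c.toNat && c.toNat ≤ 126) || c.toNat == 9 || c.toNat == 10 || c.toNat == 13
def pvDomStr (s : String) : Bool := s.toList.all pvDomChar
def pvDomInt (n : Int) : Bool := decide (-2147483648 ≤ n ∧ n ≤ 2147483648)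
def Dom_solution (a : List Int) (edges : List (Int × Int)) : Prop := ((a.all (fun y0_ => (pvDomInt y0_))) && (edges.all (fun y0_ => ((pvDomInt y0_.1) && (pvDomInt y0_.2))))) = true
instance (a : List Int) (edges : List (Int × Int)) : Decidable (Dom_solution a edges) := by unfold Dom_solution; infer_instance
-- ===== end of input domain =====

-- B replaces A's recursive subtree computation and parent-pruning pass by one DFS that
-- records visitation order plus a reverse-order accumulation sweep (simpler: no recursion,
-- no adjacency pruning).  Both Pythons mutate only their own local lists.

-- ===== PORT A =====
-- helper shared by both ports: both Pythons build the adjacency lists with the same three lines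
-- (indices are kept as Int; inside Pre_ all indices are in range, so no Python wraparound occurs)
def pvBuildAdj (edges : List (Int × Int)) : Int → List Int :=
  edges.foldl (fun adj e =>
    let adj1 : Int → List Int := fun i => if i = e.1 then adj i ++ [e.2] else adj i
    fun i => if i = e.2 then adj1 i ++ [e.1] else adj1 i)
    (fun _ => [])

-- A's while-loop DFS assigning depth and parent; the stack is kept head-first (head = Python's
-- list end); fuel only makes the loop total — each iteration pops one element and every push is
-- of a fresh (depth = -1) edge endpoint, so fuel n + 2*len(edges) + 1 is never exhausted.
-- the body of A's inner 'for inode in nodes[top][1]' loop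
def pvStepA (top : Int) (st : List Int × (Int → Int) × (Int → Int)) (c : Int) : List Int × (Int → Int) × (Int → Int) :=
  if st.2.1 c = -1 then
    (c :: st.1, fun i => if i = c then st.2.1 top + 1 else st.2.1 i,
     fun i => if i = c then top else st.2.2 i)
  else st

def pvDfsA (adj : Int → List Int) : Nat → List Int → (Int → Int) → (Int → Int) → ((Int → Int) × (Int → Int))
  | 0, _, depth, par => (depth, par)
  | _ + 1, [], depth, par => (depth, par)
  | fuel + 1, top :: rest, depth, par =>
      let st := (adj top).foldl (pvStepA top) (rest, depth, par)
      pvDfsA adj fuel st.1 st.2.1 st.2.2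

-- A's recursive calc (ret over children, then push weight to parent, then add |own weight|);
-- fuel n+1 only makes it total — inside Pre_ the recursion depth is bounded by the tree depth.
def pvCalcA (children : Int → List Int) (par : Int → Int) : Nat → (Int → Int) → Int → (Int × (Int → Int))
  | 0, w, _ => (0, w)
  | fuel + 1, w, v =>
      let rw := (children v).foldl
        (fun (acc : Int × (Int → Int)) c =>
          let r := pvCalcA children par fuel acc.2 c
          (acc.1 + r.1, r.2)) (0, w)
      let w1 := if par v ≠ -1 then (fun i => if i = par v then rw.2 i + rw.2 v else rw.2 i) else rw.2
      (rw.1 + |w1 v|, w1)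

def solution (a : List Int) (edges : List (Int × Int)) : Int :=
  if a.sum ≠ 0 then -1
  else
    let n := a.length
    let w0 : Int → Int := fun i => (PySem.List.pyGet? a i).getD 0
    let adj := pvBuildAdj edges
    let dp := pvDfsA adj (n + 2 * edges.length + 1) [0]
      (fun i => if i = 0 then 0 else -1) (fun _ => -1)
    let par := dp.2
    -- the enumerate loop: nodes[idx][1].remove(parent) exactly when parent ≠ -1
    let children : Int → List Int := fun v =>
      if par v ≠ -1 then (PySem.List.remove? (adj v) (par v)).getD (adj v) else adj v
    (pvCalcA children par (n + 1) w0 0).1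

-- ===== PORT B =====
-- B's DFS: marks visited at push time, records the pop order, assigns parents.
-- the body of B's inner 'for u in adj[v]' loop
def pvStepB (v : Int) (st : List Int × (Int → Bool) × (Int → Int)) (u : Int) : List Int × (Int → Bool) × (Int → Int) :=
  if st.2.1 u = false then
    (u :: st.1, fun i => if i = u then true else st.2.1 i,
     fun i => if i = u then v else st.2.2 i)
  else st

def pvDfsB (adj : Int → List Int) : Nat → List Int → (Int → Bool) → (Int → Int) → List Int → ((Int → Bool) × (Int → Int) × List Int)
  | 0, _, vis, par, order => (vis, par, order)
  | _ + 1, [], vis, par, order => (vis, par, order)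
  | fuel + 1, v :: rest, vis, par, order =>
      let st := (adj v).foldl (pvStepB v) (rest, vis, par)
      pvDfsB adj fuel st.1 st.2.1 st.2.2 (order ++ [v])

-- one step of B's reverse sweep: ans += |weight[v]|; weight[parent[v]] += weight[v]
def pvSweepB (par : Int → Int) (st : Int × (Int → Int)) (v : Int) : Int × (Int → Int) :=
  let ans := st.1 + |st.2 v|
  let p := par v
  if p ≠ -1 then (ans, fun i => if i = p then st.2 i + st.2 v else st.2 i) else (ans, st.2)

def solution_alt (a : List Int) (edges : List (Int × Int)) : Int :=
  if a.sum ≠ 0 then -1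
  else
    let n := a.length
    let adj := pvBuildAdj edges
    let res := pvDfsB adj (n + 2 * edges.length + 1) [0]
      (fun i => i == 0) (fun _ => -1) []
    let par := res.2.1
    let w0 : Int → Int := fun i => (PySem.List.pyGet? a i).getD 0
    (res.2.2.reverse.foldl (pvSweepB par) (0, w0)).1

-- ===== PRECONDITION & SPEC =====
-- Pre_ restricts (when sum(a) == 0) to the problem's stated input domain: edges forming a tree
-- on the nodes 0..len(a)-1.  Outside that domain A may raise (IndexError on out-of-range
-- endpoints, unbounded recursion when the component of node 0 contains a cycle), so those
-- inputs cannot be claimed; the remaining excluded inputs (e.g. disconnected graphs whose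
-- 0-component is a tree, or in-range negative endpoints) lie outside the task's stated domain,
-- and on the cited examples of them A and B return the same value.  When sum(a) ≠ 0 both
-- programs return -1 immediately, so every such input is admitted.  The last conjunct is
-- connectivity in closed form: every edge-closed subset of the nodes containing 0 is everything.
def Pre_solution (a : List Int) (edges : List (Int × Int)) : Prop :=
  a.sum ≠ 0 ∨
  (1 ≤ a.length ∧ edges.length + 1 = a.length ∧
   (∀ e ∈ edges, 0 ≤ e.1 ∧ e.1 < (a.length : Int) ∧ 0 ≤ e.2 ∧ e.2 < (a.length : Int) ∧ e.1 ≠ e.2) ∧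
   (∀ S ∈ (Finset.range a.length).powerset, 0 ∈ S →
      (∀ e ∈ edges, (e.1.toNat ∈ S ↔ e.2.toNat ∈ S)) → ∀ v ∈ Finset.range a.length, v ∈ S))
instance (a : List Int) (edges : List (Int × Int)) : Decidable (Pre_solution a edges) := by
  unfold Pre_solution; infer_instance

def pvWitness_solution : List Int × (List (Int × Int)) := ([1, -3, 2], [(0, 1), (2, 0)])

def Spec_solution (a : List Int) (edges : List (Int × Int)) (out : Int) : Prop := out = solution_alt a edges
instance (a : List Int) (edges : List (Int × Int)) (out : Int) : Decidable (Spec_solution a edges out) := by unfold Spec_solution; infer_instance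

-- ===== CLAIM (what is proved, stated in full; the proofs are below) =====
def Claim_equal_solution : Prop := ∀ (a : List Int) (edges : List (Int × Int)), Dom_solution a edges → Pre_solution a edges → Spec_solution a edges (solution a edges)

-- ===== LEMMAS AND PROOFS =====

/- ---------- generic tree-order machinery ---------- -/

def pvAnc (par : Int → Int) (j : Nat) (u : Int) : Int := par^[j] u

def pvKids (par : Int → Int) (L : List Int) (v : Int) : List Int :=
  L.filter (fun c => decide (c ≠ 0) && decide (par c = v))

def pvS (w0 par : Int → Int) (L : List Int) : Nat → Int → Int
  | 0, v => w0 v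
  | k+1, v => w0 v + ((pvKids par L v).map (pvS w0 par L k)).sum

-- invariants of the parent/order structure produced by the DFS on a tree input
structure PvTreeH (par : Int → Int) (L : List Int) : Prop where
  nodup : L.Nodup
  zero_mem : (0:Int) ∈ L
  neg_one : (-1:Int) ∉ L
  par_zero : par 0 = -1
  before : ∀ c ∈ L, c ≠ 0 → par c ∈ L ∧ L.idxOf (par c) < L.idxOf c

theorem pvTreeH_par_ne_self {par : Int → Int} {L : List Int} (H : PvTreeH par L)
    {v : Int} (hv : v ∈ L) : par v ≠ v := by
  by_cases h0 : v = 0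
  · subst h0; rw [H.par_zero]; decide
  · intro h; have := (H.before v hv h0).2; rw [h] at this; omega

theorem pvTreeH_par_ne_neg_one {par : Int → Int} {L : List Int} (H : PvTreeH par L)
    {c : Int} (hc : c ∈ L) (h0 : c ≠ 0) : par c ≠ -1 := by
  intro h; exact H.neg_one (h ▸ (H.before c hc h0).1)

theorem pvS_stab {w0 par : Int → Int} {L : List Int} (H : PvTreeH par L) :
    ∀ m, ∀ v ∈ L, L.length - L.idxOf v ≤ m →
      ∀ k k', m ≤ k → m ≤ k' → pvS w0 par L k v = pvS w0 par L k' v := by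
  intro m
  induction m using Nat.strong_induction_on with
  | _ m IH =>
    intro v hv hm k k' hk hk'
    have hidx : L.idxOf v < L.length := List.idxOf_lt_length_of_mem hv
    have hm1 : 1 ≤ m := by omega
    obtain ⟨k1, rfl⟩ : ∃ k1, k = k1 + 1 := ⟨k - 1, by omega⟩
    obtain ⟨k1', rfl⟩ : ∃ k1', k' = k1' + 1 := ⟨k' - 1, by omega⟩
    show w0 v + _ = w0 v + _
    congr 1
    apply congrArg
    apply List.map_congr_left
    intro c hc
    have hc' : c ∈ L ∧ c ≠ 0 ∧ par c = v := by
      simpa [pvKids, List.mem_filter] using hc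
    have hlt : L.idxOf v < L.idxOf c := by
      have := (H.before c hc'.1 hc'.2.1).2; rw [hc'.2.2] at this; exact this
    have hcidx : L.idxOf c < L.length := List.idxOf_lt_length_of_mem hc'.1
    exact IH (m-1) (by omega) c hc'.1 (by omega) k1 k1' (by omega) (by omega)

theorem pvSS_unfold {w0 par : Int → Int} {L : List Int} (H : PvTreeH par L)
    {v : Int} (hv : v ∈ L) :
    pvS w0 par L L.length v
      = w0 v + ((pvKids par L v).map (pvS w0 par L L.length)).sum := by
  have hidx : L.idxOf v < L.length := List.idxOf_lt_length_of_mem hv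
  obtain ⟨N, hN⟩ : ∃ N, L.length = N + 1 := ⟨L.length - 1, by omega⟩
  conv_lhs => rw [hN]
  show w0 v + _ = w0 v + _
  congr 1
  apply congrArg
  apply List.map_congr_left
  intro c hc
  have hc' : c ∈ L ∧ c ≠ 0 ∧ par c = v := by
    simpa [pvKids, List.mem_filter] using hc
  have hlt : L.idxOf v < L.idxOf c := by
    have := (H.before c hc'.1 hc'.2.1).2; rw [hc'.2.2] at this; exact this
  have hcidx : L.idxOf c < L.length := List.idxOf_lt_length_of_mem hc'.1
  exact pvS_stab H (L.length - L.idxOf c) c hc'.1 le_rfl N L.length (by omega) (by omega)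

/- ---------- the generic sweep ---------- -/

def pvWOf (w0 par : Int → Int) (SS : Int → Int) (A : List Int) : Int → Int :=
  fun i => w0 i + ((A.filter (fun c => decide (c ≠ 0) && decide (par c = i))).map SS).sum

theorem pvWOf_nil (w0 par : Int → Int) (SS : Int → Int) : pvWOf w0 par SS [] = w0 := by
  funext i; simp [pvWOf]

theorem pvSweep_go {w0 par : Int → Int} {L : List Int} (H : PvTreeH par L) :
    ∀ (R A : List Int) (ans : Int),
      (A ++ R).Nodup → (∀ v ∈ A ++ R, v ∈ L) →
      (∀ v ∈ R, ∀ c ∈ L, c ≠ 0 → par c = v → (c ∈ A ∨ ∃ X Y, R = X ++ v :: Y ∧ c ∈ X)) →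
      List.foldl (pvSweepB par) (ans, pvWOf w0 par (pvS w0 par L L.length) A) R
        = (ans + (R.map (fun v => |pvS w0 par L L.length v|)).sum,
           pvWOf w0 par (pvS w0 par L L.length) (A ++ R)) := by
  intro R
  induction R with
  | nil => intro A ans _ _ _; simp
  | cons v R' IHR =>
    intro A ans hnd hsub hgood
    have hvL : v ∈ L := hsub v (by simp)
    have hnd' := hnd; rw [List.nodup_append] at hnd'
    have hvR' : v ∉ R' := (List.nodup_cons.mp hnd'.2.1).1
    -- the current weight of v is its full subtree sum
    have hkids : ∀ c, (c ∈ A ∧ c ≠ 0 ∧ par c = v) ↔ (c ∈ L ∧ c ≠ 0 ∧ par c = v) := by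
      intro c
      constructor
      · rintro ⟨hcA, h0, hp⟩
        exact ⟨hsub c (by simp [hcA]), h0, hp⟩
      · rintro ⟨hcL, h0, hp⟩
        rcases hgood v (by simp) c hcL h0 hp with hA | ⟨X, Y, hXY, hcX⟩
        · exact ⟨hA, h0, hp⟩
        · exfalso
          cases X with
          | nil => exact absurd hcX (by simp)
          | cons x X' =>
            rw [List.cons_append] at hXY
            obtain ⟨rfl, h2⟩ := List.cons_eq_cons.mp hXY
            exact hvR' (h2 ▸ List.mem_append_right X' (by simp))
    have hfilter : (A.filter (fun c => decide (c ≠ 0) && decide (par c = v))).Perm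
        (pvKids par L v) := by
      apply List.perm_of_nodup_nodup_toFinset_eq
      · exact (hnd'.1).filter _
      · exact H.nodup.filter _
      · ext c
        simp only [List.mem_toFinset, List.mem_filter, pvKids, Bool.and_eq_true,
          decide_eq_true_eq]
        constructor
        · rintro ⟨h1, h2, h3⟩
          have := (hkids c).1 ⟨h1, h2, h3⟩; exact ⟨this.1, this.2.1, this.2.2⟩
        · rintro ⟨h1, h2, h3⟩
          have := (hkids c).2 ⟨h1, h2, h3⟩; exact ⟨this.1, this.2.1, this.2.2⟩
    have hwv : pvWOf w0 par (pvS w0 par L L.length) A v = pvS w0 par L L.length v := by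
      rw [pvWOf, pvSS_unfold H hvL]
      congr 1
      exact List.Perm.sum_eq (hfilter.map _)
    rw [List.foldl_cons]
    have hstep : pvSweepB par (ans, pvWOf w0 par (pvS w0 par L L.length) A) v
        = (ans + |pvS w0 par L L.length v|,
           pvWOf w0 par (pvS w0 par L L.length) (A ++ [v])) := by
      simp only [pvSweepB]
      by_cases h0 : v = 0
      · subst h0
        rw [H.par_zero]
        simp only [ne_eq, not_true_eq_false, if_false, hwv]
        congr 1
        funext i
        simp [pvWOf]
      · have hp : par v ≠ -1 := pvTreeH_par_ne_neg_one H hvL h0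
        simp only [ne_eq, hp, not_false_eq_true, if_true, hwv]
        congr 1
        funext i
        by_cases hip : i = par v
        · subst hip
          simp only [pvWOf, List.filter_append, List.map_append, List.sum_append]
          have hf1 : List.filter (fun c => decide (c ≠ 0) && decide (par c = par v)) [v] = [v] := by
            simp [h0]
          rw [hf1]
          simp only [if_true, List.map_cons, List.map_nil, List.sum_cons, List.sum_nil, add_zero]
          ring
        · simp only [pvWOf, List.filter_append, List.map_append, List.sum_append]
          have hf0 : List.filter (fun c => decide (c ≠ 0) && decide (par c = i)) [v] = [] := by
            simp only [List.filter_cons, List.filter_nil]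
            rw [if_neg]
            simp only [Bool.and_eq_true, decide_eq_true_eq, not_and]
            intro _; exact fun h => hip (h ▸ rfl)
          rw [hf0]
          simp [hip]
    rw [hstep]
    have hrec := IHR (A ++ [v]) (ans + |pvS w0 par L L.length v|)
      (by simpa using hnd)
      (by intro u hu; apply hsub; simpa using hu)
      (by
        intro u hu c hcL h0 hp
        rcases hgood u (by simp [hu]) c hcL h0 hp with hA | ⟨X, Y, hXY, hcX⟩
        · exact Or.inl (by simp [hA])
        · cases X with
          | nil => exact absurd hcX (by simp)
          | cons x X' =>
            rw [List.cons_append] at hXY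
            obtain ⟨rfl, h2⟩ := List.cons_eq_cons.mp hXY
            rcases (by simpa using hcX : c = v ∨ c ∈ X') with rfl | hcX'
            · exact Or.inl (by simp)
            · exact Or.inr ⟨X', Y, h2, hcX'⟩)
    rw [hrec]
    simp [add_assoc]

/- ---------- list decomposition helpers ---------- -/

theorem pv_dec (L : List Int) (v : Int) (hv : v ∈ L) :
    L = L.take (L.idxOf v) ++ v :: L.drop (L.idxOf v + 1) := by
  have h1 : L.idxOf v < L.length := List.idxOf_lt_length_of_mem hv
  conv_lhs => rw [← List.take_append_drop (L.idxOf v) L]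
  rw [List.drop_eq_getElem_cons h1, List.getElem_idxOf]

theorem pv_mem_drop_of_idx_lt (L : List Int) (v c : Int) (hc : c ∈ L)
    (hlt : L.idxOf v < L.idxOf c) : c ∈ L.drop (L.idxOf v + 1) := by
  have h1 : L.idxOf c < L.length := List.idxOf_lt_length_of_mem hc
  have h2 : L.idxOf v + 1 + (L.idxOf c - L.idxOf v - 1) < L.length := by omega
  have h3 : (L.drop (L.idxOf v + 1))[L.idxOf c - L.idxOf v - 1]'(by
      rw [List.length_drop]; omega) = L[L.idxOf c]'h1 := by
    rw [List.getElem_drop]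
    congr 1
    omega
  rw [List.getElem_idxOf] at h3
  exact h3 ▸ List.getElem_mem _
 
theorem pv_dec_rev (L : List Int) (v c : Int) (hv : v ∈ L) (hc : c ∈ L)
    (hlt : L.idxOf v < L.idxOf c) : ∃ X Y, L.reverse = X ++ v :: Y ∧ c ∈ X := by
  refine ⟨(L.drop (L.idxOf v + 1)).reverse, (L.take (L.idxOf v)).reverse, ?_, ?_⟩
  · conv_lhs => rw [pv_dec L v hv]
    rw [List.reverse_append, List.reverse_cons, List.append_assoc, List.singleton_append]
  · rw [List.mem_reverse]
    exact pv_mem_drop_of_idx_lt L v c hc hlt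

/- ---------- characterization of the DFS inner loops ---------- -/

def pvNews (pred : Int → Bool) : List Int → List Int
  | [] => []
  | u :: l => if pred u then pvNews pred l else u :: pvNews (fun i => if i = u then true else pred i) l

theorem pvNews_congr : ∀ (l : List Int) (p q : Int → Bool), (∀ i, p i = q i) → pvNews p l = pvNews q l := by
  intro l
  induction l with
  | nil => intro p q h; rfl
  | cons u l IH =>
    intro p q h
    simp only [pvNews, h u]
    by_cases hq : q u = true
    · rw [if_pos hq, if_pos hq]; exact IH _ _ h
    · rw [if_neg hq, if_neg hq]
      congr 1
      apply IH
      intro i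
      by_cases hi : i = u <;> simp [hi, h i]

theorem pvNews_spec : ∀ (l : List Int) (p : Int → Bool),
    (pvNews p l).Nodup ∧ (∀ u ∈ pvNews p l, p u = false ∧ u ∈ l) ∧
    (∀ u ∈ l, p u = true ∨ u ∈ pvNews p l) := by
  intro l
  induction l with
  | nil => intro p; exact ⟨List.nodup_nil, by simp [pvNews], by simp⟩
  | cons u l IH =>
    intro p
    by_cases hp : p u = true
    · simp only [pvNews, if_pos hp]
      obtain ⟨h1, h2, h3⟩ := IH p
      refine ⟨h1, ?_, ?_⟩
      · intro x hx; exact ⟨(h2 x hx).1, List.mem_cons_of_mem _ (h2 x hx).2⟩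
      · intro x hx
        rcases List.mem_cons.mp hx with rfl | hx'
        · exact Or.inl hp
        · exact h3 x hx'
    · have hp' : p u = false := by simpa using hp
      simp only [pvNews, hp', Bool.false_eq_true, if_false]
      obtain ⟨h1, h2, h3⟩ := IH (fun i => if i = u then true else p i)
      refine ⟨?_, ?_, ?_⟩
      · rw [List.nodup_cons]
        refine ⟨fun hu => ?_, h1⟩
        have := (h2 u hu).1
        simp at this
      · intro x hx
        rcases List.mem_cons.mp hx with rfl | hx'
        · exact ⟨hp', List.mem_cons.mpr (Or.inl rfl)⟩
        · have := h2 x hx'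
          by_cases hxu : x = u
          · rw [hxu] at this; simp at this
          · exact ⟨by simpa [hxu] using this.1, List.mem_cons_of_mem _ this.2⟩
      · intro x hx
        rcases List.mem_cons.mp hx with rfl | hx'
        · exact Or.inr (List.mem_cons.mpr (Or.inl rfl))
        · rcases h3 x hx' with h | h
          · by_cases hxu : x = u
            · exact Or.inr (List.mem_cons.mpr (Or.inl hxu))
            · simp only [hxu, if_false] at h
              exact Or.inl h
          · exact Or.inr (List.mem_cons_of_mem _ h)

theorem pvFoldB_char (v : Int) : ∀ (l stack : List Int) (vis : Int → Bool) (par : Int → Int),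
    l.foldl (pvStepB v) (stack, vis, par) =
      ((pvNews vis l).reverse ++ stack,
       fun i => vis i || decide (i ∈ pvNews vis l),
       fun i => if i ∈ pvNews vis l then v else par i) := by
  intro l
  induction l with
  | nil =>
    intro stack vis par
    simp [pvNews]
  | cons u l IH =>
    intro stack vis par
    rw [List.foldl_cons]
    by_cases hu : vis u = true
    · have hstep : pvStepB v (stack, vis, par) u = (stack, vis, par) := by
        simp [pvStepB, hu]
      rw [hstep, IH]
      simp only [pvNews, hu, if_true]
    · have hu' : vis u = false := by simpa using hu
      have hstep : pvStepB v (stack, vis, par) u =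
          (u :: stack, fun i => if i = u then true else vis i,
           fun i => if i = u then v else par i) := by
        simp [pvStepB, hu']
      rw [hstep, IH]
      have hout : pvNews vis (u :: l) = u :: pvNews (fun i => if i = u then true else vis i) l := by
        simp only [pvNews, hu', Bool.false_eq_true, if_false]
      rw [hout]
      refine congrArg₂ _ ?_ (congrArg₂ _ ?_ ?_)
      · rw [List.reverse_cons, List.append_assoc, List.singleton_append]
      · funext i
        by_cases hi : i = u
        · rw [hi]; simp
        · simp [hi]
      · funext i
        by_cases hi : i = u
        · rw [hi]
          by_cases hmem : u ∈ pvNews (fun j => if j = u then true else vis j) l <;>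
            simp [hmem]
        · simp [hi]

theorem pvFoldA_char (top : Int) : ∀ (l stack : List Int) (depth par : Int → Int), 0 ≤ depth top →
    l.foldl (pvStepA top) (stack, depth, par) =
      ((pvNews (fun i => !(depth i == -1)) l).reverse ++ stack,
       fun i => if i ∈ pvNews (fun i => !(depth i == -1)) l then depth top + 1 else depth i,
       fun i => if i ∈ pvNews (fun i => !(depth i == -1)) l then top else par i) := by
  intro l
  induction l with
  | nil =>
    intro stack depth par _
    simp [pvNews]
  | cons u l IH =>
    intro stack depth par htop
    rw [List.foldl_cons]
    by_cases hu : depth u = -1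
    · have htopu : top ≠ u := by intro h; rw [h, hu] at htop; omega
      have hstep : pvStepA top (stack, depth, par) u =
          (u :: stack, fun i => if i = u then depth top + 1 else depth i,
           fun i => if i = u then top else par i) := by
        simp [pvStepA, hu]
      have htop' : (0:Int) ≤ (fun i => if i = u then depth top + 1 else depth i) top := by
        simpa [htopu] using htop
      rw [hstep, IH _ _ _ htop']
      have hpred : ∀ i, (!((if i = u then depth top + 1 else depth i) == -1))
          = (if i = u then true else !(depth i == -1)) := by
        intro i
        by_cases hi : i = u
        · rw [hi]; simp; omega
        · simp [hi]
      have hnews : pvNews (fun i => !((if i = u then depth top + 1 else depth i) == -1)) l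
          = pvNews (fun i => if i = u then true else !(depth i == -1)) l :=
        pvNews_congr l _ _ hpred
      have hout : pvNews (fun i => !(depth i == -1)) (u :: l)
          = u :: pvNews (fun i => if i = u then true else !(depth i == -1)) l := by
        simp only [pvNews, hu, beq_self_eq_true, Bool.not_true, Bool.false_eq_true, if_false]
      rw [hnews, hout]
      rw [if_neg htopu]
      refine congrArg₂ _ ?_ (congrArg₂ _ ?_ ?_)
      · rw [List.reverse_cons, List.append_assoc, List.singleton_append]
      · funext i
        by_cases hi : i = u
        · rw [hi]
          by_cases hmem : u ∈ pvNews (fun j => if j = u then true else !(depth j == -1)) l <;>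
            simp [hmem]
        · simp [hi]
      · funext i
        by_cases hi : i = u
        · rw [hi]
          by_cases hmem : u ∈ pvNews (fun j => if j = u then true else !(depth j == -1)) l <;>
            simp [hmem]
        · simp [hi]
    · have hstep : pvStepA top (stack, depth, par) u = (stack, depth, par) := by
        simp [pvStepA, hu]
      rw [hstep, IH _ _ _ htop]
      simp only [pvNews]
      rw [if_pos (by simp [hu])]

/- ---------- post-order of A's recursion ---------- -/

def pvPost (ch : Int → List Int) : Nat → Int → List Int
  | 0, _ => []
  | k+1, v => ((ch v).flatMap (pvPost ch k)) ++ [v]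

-- chains: ∃ j with par^[j] u = v, all intermediate points in L, all but the last nonzero
def PvChain (par : Int → Int) (L : List Int) (j : Nat) (u v : Int) : Prop :=
  pvAnc par j u = v ∧ (∀ i ≤ j, pvAnc par i u ∈ L) ∧ (∀ i < j, pvAnc par i u ≠ 0)

theorem pvPost_chain {ch : Int → List Int} {par : Int → Int} {L : List Int}
    (Hch : ∀ v ∈ L, ∀ c, c ∈ ch v ↔ (c ∈ L ∧ c ≠ 0 ∧ par c = v)) :
    ∀ k v, v ∈ L → ∀ u ∈ pvPost ch k v, ∃ j, PvChain par L j u v := by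
  intro k
  induction k with
  | zero => intro v _ u hu; simp [pvPost] at hu
  | succ k IH =>
    intro v hv u hu
    rcases List.mem_append.mp hu with hu' | hu'
    · obtain ⟨c, hc, huc⟩ := List.mem_flatMap.mp hu'
      have hcL := (Hch v hv c).mp hc
      obtain ⟨j, hj1, hj2, hj3⟩ := IH c hcL.1 u huc
      refine ⟨j + 1, ?_, ?_, ?_⟩
      · rw [pvAnc, Function.iterate_succ_apply']
        show par (pvAnc par j u) = v
        rw [hj1]; exact hcL.2.2
      · intro i hi
        rcases Nat.lt_or_ge i (j+1) with h | h
        · exact hj2 i (by omega)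
        · have : i = j + 1 := by omega
          rw [this, pvAnc, Function.iterate_succ_apply']
          show par (pvAnc par j u) ∈ L
          rw [hj1, hcL.2.2]; exact hv
      · intro i hi
        rcases Nat.lt_or_ge i j with h | h
        · exact hj3 i h
        · have : i = j := by omega
          rw [this, hj1]; exact hcL.2.1
    · have huv : u = v := by simpa using hu'
      refine ⟨0, ?_, ?_, ?_⟩
      · simpa [pvAnc] using huv
      · intro i hi
        have : i = 0 := by omega
        rw [this]
        show u ∈ L
        rw [huv]; exact hv
      · intro i hi; omega

theorem pv_chain_idx {par : Int → Int} {L : List Int} (H : PvTreeH par L) :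
    ∀ j u v, PvChain par L j u v → 0 < j → L.idxOf v < L.idxOf u := by
  intro j
  induction j with
  | zero => intro u v _ h; omega
  | succ j IH =>
    intro u v hc _
    obtain ⟨h1, h2, h3⟩ := hc
    have hx : pvAnc par j u ∈ L := h2 j (by omega)
    have hx0 : pvAnc par j u ≠ 0 := h3 j (by omega)
    have hb := H.before _ hx hx0
    have hpar : par (pvAnc par j u) = v := by
      rw [← h1]
      show par (par^[j] u) = par^[j+1] u
      rw [Function.iterate_succ_apply']
    rcases Nat.eq_zero_or_pos j with rfl | hj
    · have hpar0 : par u = v := hpar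
      rw [← hpar0]
      exact hb.2
    · have hlt : L.idxOf (pvAnc par j u) < L.idxOf u :=
        IH u _ ⟨rfl, fun i hi => h2 i (by omega), fun i hi => h3 i (by omega)⟩ hj
      rw [hpar] at hb
      omega

-- two chains from u ending at siblings (children of the same v) end at the same node
theorem pv_sib_unique {par : Int → Int} {L : List Int} (H : PvTreeH par L)
    {v : Int} (hv : v ∈ L) :
    ∀ (u c₀ c₁ : Int) (j₀ j₁ : Nat),
      PvChain par L j₀ u c₀ → PvChain par L j₁ u c₁ →
      c₀ ∈ L → c₀ ≠ 0 → par c₀ = v → c₁ ∈ L → c₁ ≠ 0 → par c₁ = v → c₀ = c₁ := by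
  have key : ∀ (u c₀ c₁ : Int) (j₀ j₁ : Nat), j₀ ≤ j₁ →
      PvChain par L j₀ u c₀ → PvChain par L j₁ u c₁ →
      c₀ ∈ L → c₀ ≠ 0 → par c₀ = v → c₁ ∈ L → c₁ ≠ 0 → par c₁ = v → c₀ = c₁ := by
    intro u c₀ c₁ j₀ j₁ hle h0 h1 hc0L hc00 hc0p hc1L hc10 hc1p
    rcases Nat.eq_or_lt_of_le hle with rfl | hlt
    · rw [← h0.1, ← h1.1]
    · -- c₁ = par^[j₁ - j₀] c₀, a strict ancestor of c₀
      have hsplit : pvAnc par (j₁ - j₀) c₀ = c₁ := by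
        rw [← h0.1, ← h1.1]
        show par^[j₁ - j₀] (par^[j₀] u) = par^[j₁] u
        rw [← Function.iterate_add_apply]
        congr 1
        omega
      obtain ⟨d, hd⟩ : ∃ d, j₁ - j₀ = d + 1 := ⟨j₁ - j₀ - 1, by omega⟩
      rcases Nat.eq_zero_or_pos d with rfl | hdpos
      · -- c₁ = par c₀ = v, but par c₁ = v gives par v = v
        exfalso
        have hpc : par c₀ = c₁ := by rw [← hsplit, hd]; rfl
        rw [hc0p] at hpc
        rw [← hpc] at hc1p
        exact pvTreeH_par_ne_self H hv hc1p
      · -- c₁ = par^[d] v with d ≥ 1: then idx c₁ < idx v < idx c₁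
        exfalso
        have hshift : ∀ i, pvAnc par i v = pvAnc par (i + j₀ + 1) u := by
          intro i
          rw [← hc0p, ← h0.1]
          show par^[i] (par (par^[j₀] u)) = par^[i + j₀ + 1] u
          rw [← Function.iterate_succ_apply' par j₀ u, ← Function.iterate_add_apply]
          rfl
        have hchain : PvChain par L d v c₁ := by
          refine ⟨?_, ?_, ?_⟩
          · rw [hshift d]
            have hdj : d + j₀ + 1 = j₁ := by omega
            rw [hdj, h1.1]
          · intro i hi
            rw [hshift i]
            exact h1.2.1 _ (by omega)
          · intro i hi
            rw [hshift i]
            exact h1.2.2 _ (by omega)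
        have h2 : L.idxOf c₁ < L.idxOf v := pv_chain_idx H d v c₁ hchain hdpos
        have h3 : L.idxOf v < L.idxOf c₁ := by
          have := (H.before c₁ hc1L hc10).2
          rw [hc1p] at this
          exact this
        omega
  intro u c₀ c₁ j₀ j₁ h0 h1 hc0L hc00 hc0p hc1L hc10 hc1p
  rcases Nat.le_total j₀ j₁ with hle | hle
  · exact key u c₀ c₁ j₀ j₁ hle h0 h1 hc0L hc00 hc0p hc1L hc10 hc1p
  · exact (key u c₁ c₀ j₁ j₀ hle h1 h0 hc1L hc10 hc1p hc0L hc00 hc0p).symm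

theorem pvPost_sub {ch : Int → List Int} {par : Int → Int} {L : List Int}
    (Hch : ∀ v ∈ L, ∀ c, c ∈ ch v ↔ (c ∈ L ∧ c ≠ 0 ∧ par c = v)) :
    ∀ k v, v ∈ L → ∀ u ∈ pvPost ch k v, u ∈ L := by
  intro k v hv u hu
  obtain ⟨j, hc⟩ := pvPost_chain Hch k v hv u hu
  have := hc.2.1 0 (by omega)
  simpa [pvAnc] using this

theorem pvPost_nodup {ch : Int → List Int} {par : Int → Int} {L : List Int}
    (H : PvTreeH par L)
    (Hch : ∀ v ∈ L, ∀ c, c ∈ ch v ↔ (c ∈ L ∧ c ≠ 0 ∧ par c = v))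
    (Hchnd : ∀ v ∈ L, (ch v).Nodup) :
    ∀ k v, v ∈ L → (pvPost ch k v).Nodup := by
  intro k
  induction k with
  | zero => intro v _; simp [pvPost]
  | succ k IH =>
    intro v hv
    show (((ch v).flatMap (pvPost ch k)) ++ [v]).Nodup
    rw [List.nodup_append]
    refine ⟨?_, List.nodup_singleton v, ?_⟩
    · rw [List.nodup_flatMap]
      refine ⟨fun c hc => IH c ((Hch v hv c).mp hc).1, ?_⟩
      have hnd := Hchnd v hv
      have key : ∀ c₀ c₁ : Int, c₀ ∈ ch v → c₁ ∈ ch v → c₀ ≠ c₁ →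
          Function.onFun List.Disjoint (pvPost ch k) c₀ c₁ := by
        intro c₀ c₁ hc₀ hc₁ hne u hu₀ hu₁
        apply hne
        have hc₀' := (Hch v hv c₀).mp hc₀
        have hc₁' := (Hch v hv c₁).mp hc₁
        obtain ⟨j₀, hch₀⟩ := pvPost_chain Hch k c₀ hc₀'.1 u hu₀
        obtain ⟨j₁, hch₁⟩ := pvPost_chain Hch k c₁ hc₁'.1 u hu₁
        exact pv_sib_unique H hv u c₀ c₁ j₀ j₁ hch₀ hch₁
          hc₀'.1 hc₀'.2.1 hc₀'.2.2 hc₁'.1 hc₁'.2.1 hc₁'.2.2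
      exact List.Pairwise.imp_of_mem (fun ha hb h => key _ _ ha hb h) hnd
    · intro u hu b hb
      have hbv : b = v := by simpa using hb
      intro huv
      rw [hbv] at huv
      subst huv
      obtain ⟨c, hc, huc⟩ := List.mem_flatMap.mp hu
      have hc' := (Hch u hv c).mp hc
      obtain ⟨j, hch⟩ := pvPost_chain Hch k c hc'.1 u huc
      rcases Nat.eq_zero_or_pos j with rfl | hj
      · -- u = c but par c = u: par u = u
        have huc' : u = c := hch.1
        rw [← huc'] at hc'
        exact pvTreeH_par_ne_self H hv hc'.2.2
      · have h1 : L.idxOf c < L.idxOf u := pv_chain_idx H j u c hch hj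
        have h2 : L.idxOf u < L.idxOf c := by
          have := (H.before c hc'.1 hc'.2.1).2
          rw [hc'.2.2] at this
          exact this
        omega

theorem pvPost_stab {ch : Int → List Int} {par : Int → Int} {L : List Int}
    (H : PvTreeH par L)
    (Hch : ∀ v ∈ L, ∀ c, c ∈ ch v ↔ (c ∈ L ∧ c ≠ 0 ∧ par c = v)) :
    ∀ m, ∀ v ∈ L, L.length - L.idxOf v ≤ m →
      ∀ k k', m ≤ k → m ≤ k' → pvPost ch k v = pvPost ch k' v := by
  intro m
  induction m using Nat.strong_induction_on with
  | _ m IH =>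
    intro v hv hm k k' hk hk'
    have hidx : L.idxOf v < L.length := List.idxOf_lt_length_of_mem hv
    obtain ⟨k1, rfl⟩ : ∃ k1, k = k1 + 1 := ⟨k - 1, by omega⟩
    obtain ⟨k1', rfl⟩ : ∃ k1', k' = k1' + 1 := ⟨k' - 1, by omega⟩
    show ((ch v).flatMap (pvPost ch k1)) ++ [v] = ((ch v).flatMap (pvPost ch k1')) ++ [v]
    congr 1
    rw [List.flatMap_def, List.flatMap_def]
    congr 1
    apply List.map_congr_left
    intro c hc
    have hc' := (Hch v hv c).mp hc
    have hlt : L.idxOf v < L.idxOf c := by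
      have := (H.before c hc'.1 hc'.2.1).2; rw [hc'.2.2] at this; exact this
    have hcidx : L.idxOf c < L.length := List.idxOf_lt_length_of_mem hc'.1
    exact IH (m-1) (by omega) c hc'.1 (by omega) k1 k1' (by omega) (by omega)

theorem pv_chain_exists {par : Int → Int} {L : List Int} (H : PvTreeH par L) :
    ∀ n v, v ∈ L → L.idxOf v = n → ∃ j ≤ n, PvChain par L j v 0 := by
  intro n
  induction n using Nat.strong_induction_on with
  | _ n IH =>
    intro v hv hn
    by_cases h0 : v = 0
    · subst h0
      refine ⟨0, by omega, ?_, ?_, ?_⟩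
      · rfl
      · intro i hi
        have : i = 0 := by omega
        rw [this]; exact hv
      · intro i hi; omega
    · obtain ⟨hpL, hplt⟩ := H.before v hv h0
      obtain ⟨j', hj'le, hch⟩ := IH (L.idxOf (par v)) (by omega) (par v) hpL rfl
      refine ⟨j' + 1, by omega, ?_, ?_, ?_⟩
      · show par^[j'+1] v = 0
        rw [Function.iterate_succ_apply]
        exact hch.1
      · intro i hi
        cases i with
        | zero => exact hv
        | succ i =>
          have := hch.2.1 i (by omega)
          show par^[i+1] v ∈ L
          rw [Function.iterate_succ_apply]
          exact this
      · intro i hi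
        cases i with
        | zero => exact h0
        | succ i =>
          have := hch.2.2 i (by omega)
          show par^[i+1] v ≠ 0
          rw [Function.iterate_succ_apply]
          exact this

theorem pv_mem_post {ch : Int → List Int} {par : Int → Int} {L : List Int}
    (Hch : ∀ v ∈ L, ∀ c, c ∈ ch v ↔ (c ∈ L ∧ c ≠ 0 ∧ par c = v)) :
    ∀ j k u v, j < k → PvChain par L j u v → u ∈ pvPost ch k v := by
  intro j
  induction j with
  | zero =>
    intro k u v hk hch
    obtain ⟨k1, rfl⟩ : ∃ k1, k = k1 + 1 := ⟨k - 1, by omega⟩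
    have huv : u = v := hch.1
    rw [huv]
    show v ∈ ((ch v).flatMap (pvPost ch k1)) ++ [v]
    exact List.mem_append_right _ (by simp)
  | succ j IH =>
    intro k u v hk hch
    obtain ⟨k1, rfl⟩ : ∃ k1, k = k1 + 1 := ⟨k - 1, by omega⟩
    set c := pvAnc par j u with hc
    have hcL : c ∈ L := hch.2.1 j (by omega)
    have hc0 : c ≠ 0 := hch.2.2 j (by omega)
    have hpc : par c = v := by
      rw [← hch.1]
      show par (par^[j] u) = par^[j+1] u
      rw [Function.iterate_succ_apply']
    have hcch : c ∈ ch v := by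
      have hvL : v ∈ L := by
        rw [← hch.1]; exact hch.2.1 (j+1) le_rfl
      exact (Hch v hvL c).mpr ⟨hcL, hc0, hpc⟩
    have hu : u ∈ pvPost ch k1 c :=
      IH k1 u c (by omega) ⟨rfl, fun i hi => hch.2.1 i (by omega), fun i hi => hch.2.2 i (by omega)⟩
    show u ∈ ((ch v).flatMap (pvPost ch k1)) ++ [v]
    exact List.mem_append_left _ (List.mem_flatMap.mpr ⟨c, hcch, hu⟩)

theorem pvPost_cover {ch : Int → List Int} {par : Int → Int} {L : List Int}
    (H : PvTreeH par L)
    (Hch : ∀ v ∈ L, ∀ c, c ∈ ch v ↔ (c ∈ L ∧ c ≠ 0 ∧ par c = v)) :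
    ∀ u ∈ L, ∀ k, L.length ≤ k → u ∈ pvPost ch k 0 := by
  intro u hu k hkn
  obtain ⟨j, hj, hch⟩ := pv_chain_exists H (L.idxOf u) u hu rfl
  have : L.idxOf u < L.length := List.idxOf_lt_length_of_mem hu
  exact pv_mem_post Hch j k u 0 (by omega) hch

theorem pvPost_before {ch : Int → List Int} {par : Int → Int} {L : List Int}
    (H : PvTreeH par L)
    (Hch : ∀ v ∈ L, ∀ c, c ∈ ch v ↔ (c ∈ L ∧ c ≠ 0 ∧ par c = v)) :
    ∀ k r, r ∈ L → ∀ v c, c ∈ ch v → v ∈ pvPost ch k r → c ∈ pvPost ch k r →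
      ∃ X Y, pvPost ch k r = X ++ v :: Y ∧ c ∈ X := by
  intro k
  induction k with
  | zero => intro r _ v c _ hv _; simp [pvPost] at hv
  | succ k IH =>
    intro r hr v c hcch hv hc
    have hvL : v ∈ L := pvPost_sub Hch (k+1) r hr v hv
    have hc' := (Hch v hvL c).mp hcch
    rcases List.mem_append.mp hv with hvflat | hvlast
    · -- v sits inside one child segment
      obtain ⟨c₀, hc₀, hvc₀⟩ := List.mem_flatMap.mp hvflat
      have hc₀' := (Hch r hr c₀).mp hc₀
      obtain ⟨j₀, hch₀⟩ := pvPost_chain Hch k c₀ hc₀'.1 v hvc₀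
      have hcr : c ≠ r := by
        intro hcr
        have hr0 : r ≠ 0 := by rw [← hcr]; exact hc'.2.1
        have hpr : par r = v := by rw [← hcr]; exact hc'.2.2
        have hchr : PvChain par L (j₀ + 1) v r := by
          refine ⟨?_, ?_, ?_⟩
          · show par^[j₀+1] v = r
            rw [Function.iterate_succ_apply']
            show par (pvAnc par j₀ v) = r
            rw [hch₀.1, hc₀'.2.2]
          · intro i hi
            rcases Nat.lt_or_ge i (j₀+1) with h | h
            · exact hch₀.2.1 i (by omega)
            · have : i = j₀ + 1 := by omega
              rw [this]
              show par^[j₀+1] v ∈ L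
              rw [Function.iterate_succ_apply']
              show par (pvAnc par j₀ v) ∈ L
              rw [hch₀.1, hc₀'.2.2]
              exact hr
          · intro i hi
            rcases Nat.lt_or_ge i j₀ with h | h
            · exact hch₀.2.2 i h
            · have : i = j₀ := by omega
              rw [this, hch₀.1]
              exact hc₀'.2.1
        have h1 : L.idxOf r < L.idxOf v := pv_chain_idx H (j₀+1) v r hchr (by omega)
        have h2 : L.idxOf v < L.idxOf r := by
          have := (H.before r hr hr0).2
          rw [hpr] at this
          exact this
        omega
      have hcflat : c ∈ (ch r).flatMap (pvPost ch k) := by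
        rcases List.mem_append.mp hc with h | h
        · exact h
        · exact absurd (by simpa using h) hcr
      obtain ⟨c₁, hc₁, hcc₁⟩ := List.mem_flatMap.mp hcflat
      have hc₁' := (Hch r hr c₁).mp hc₁
      obtain ⟨j₁, hch₁⟩ := pvPost_chain Hch k c₁ hc₁'.1 c hcc₁
      -- the chain from c through v to c₀
      have hch₀' : PvChain par L (j₀ + 1) c c₀ := by
        refine ⟨?_, ?_, ?_⟩
        · show par^[j₀+1] c = c₀
          rw [Function.iterate_succ_apply, hc'.2.2]
          exact hch₀.1
        · intro i hi
          cases i with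
          | zero => exact hc'.1
          | succ i =>
            show par^[i+1] c ∈ L
            rw [Function.iterate_succ_apply, hc'.2.2]
            exact hch₀.2.1 i (by omega)
        · intro i hi
          cases i with
          | zero => exact hc'.2.1
          | succ i =>
            show par^[i+1] c ≠ 0
            rw [Function.iterate_succ_apply, hc'.2.2]
            exact hch₀.2.2 i (by omega)
      have hc01 : c₀ = c₁ :=
        pv_sib_unique H hr c c₀ c₁ (j₀+1) j₁ hch₀' hch₁
          hc₀'.1 hc₀'.2.1 hc₀'.2.2 hc₁'.1 hc₁'.2.1 hc₁'.2.2
      rw [← hc01] at hcc₁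
      obtain ⟨X', Y', hdec, hcX'⟩ := IH c₀ hc₀'.1 v c hcch hvc₀ hcc₁
      obtain ⟨Cs1, Cs2, hsplit⟩ := List.append_of_mem hc₀
      refine ⟨Cs1.flatMap (pvPost ch k) ++ X', Y' ++ Cs2.flatMap (pvPost ch k) ++ [r], ?_, ?_⟩
      · show ((ch r).flatMap (pvPost ch k)) ++ [r] = _
        rw [hsplit, List.flatMap_append, List.flatMap_cons, hdec]
        simp [List.append_assoc]
      · exact List.mem_append_right _ hcX' 
    · -- v is the root r itself
      have hvr : v = r := by simpa using hvlast
      have hcr : c ≠ r := by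
        intro hcr
        apply pvTreeH_par_ne_self H hvL
        rw [← hvr] at hcr
        rw [hcr] at hc'
        exact hc'.2.2
      have hcflat : c ∈ (ch r).flatMap (pvPost ch k) := by
        rcases List.mem_append.mp hc with h | h
        · exact h
        · exact absurd (by simpa using h) hcr
      refine ⟨(ch r).flatMap (pvPost ch k), [], ?_, hcflat⟩
      rw [hvr]
      rfl

/- ---------- A's calc as a fold over its post-order ---------- -/

theorem pv_sweep_shift (par : Int → Int) : ∀ (R : List Int) (ans x : Int) (w : Int → Int),
    List.foldl (pvSweepB par) (x + ans, w) R
      = ((List.foldl (pvSweepB par) (ans, w) R).1 + x, (List.foldl (pvSweepB par) (ans, w) R).2) := by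
  intro R
  induction R with
  | nil => intro ans x w; simp [add_comm]
  | cons v R' IH =>
    intro ans x w
    rw [List.foldl_cons, List.foldl_cons]
    have h1 : pvSweepB par (x + ans, w) v
        = (x + (pvSweepB par (ans, w) v).1, (pvSweepB par (ans, w) v).2) := by
      simp only [pvSweepB]
      by_cases hp : par v ≠ -1 <;> simp [hp, add_assoc]
    rw [h1]
    obtain ⟨a2, w2⟩ := pvSweepB par (ans, w) v
    exact IH a2 x w2

theorem pvCalc_eq_fold (ch : Int → List Int) (par : Int → Int) :
    ∀ k (w : Int → Int) v, (∀ u ∈ pvPost ch k v, par u ≠ u) →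
      pvCalcA ch par k w v = List.foldl (pvSweepB par) (0, w) (pvPost ch k v) := by
  intro k
  induction k with
  | zero => intro w v _; rfl
  | succ k IH =>
    intro w v hne
    have inner : ∀ (cs : List Int) (acc : Int × (Int → Int)),
        (∀ c ∈ cs, ∀ u ∈ pvPost ch k c, par u ≠ u) →
        cs.foldl (fun (acc : Int × (Int → Int)) c =>
            (acc.1 + (pvCalcA ch par k acc.2 c).1, (pvCalcA ch par k acc.2 c).2)) acc
          = List.foldl (pvSweepB par) acc (cs.flatMap (pvPost ch k)) := by
      intro cs
      induction cs with
      | nil => intro acc _; rfl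
      | cons c cs' IHc =>
        intro acc hcs
        rw [List.foldl_cons, List.flatMap_cons, List.foldl_append]
        have hcalc : pvCalcA ch par k acc.2 c
            = List.foldl (pvSweepB par) (0, acc.2) (pvPost ch k c) :=
          IH acc.2 c (hcs c (by simp))
        have hshift := pv_sweep_shift par (pvPost ch k c) 0 acc.1 acc.2
        rw [add_zero] at hshift
        have hacc : (acc.1, acc.2) = acc := rfl
        rw [← hacc, hshift, hcalc]
        rw [IHc _ (fun c' hc' u hu => hcs c' (by simp [hc']) u hu)]
        congr 1
        rw [add_comm]
    have hunfold : pvCalcA ch par (k+1) w v =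
        (let st := (ch v).foldl (fun (acc : Int × (Int → Int)) c =>
            (acc.1 + (pvCalcA ch par k acc.2 c).1, (pvCalcA ch par k acc.2 c).2)) (0, w)
         let w1 := if par v ≠ -1 then (fun i => if i = par v then st.2 i + st.2 v else st.2 i) else st.2
         (st.1 + |w1 v|, w1)) := rfl
    rw [hunfold]
    rw [inner (ch v) (0, w) (fun c hc u hu => hne u
      (List.mem_append_left _ (List.mem_flatMap.mpr ⟨c, hc, hu⟩)))]
    have hfin : pvPost ch (k+1) v = ((ch v).flatMap (pvPost ch k)) ++ [v] := rfl
    have hvv : par v ≠ v := hne v (by rw [hfin]; exact List.mem_append_right _ (by simp))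
    rw [hfin, List.foldl_append]
    generalize List.foldl (pvSweepB par) (0, w) ((ch v).flatMap (pvPost ch k)) = st
    obtain ⟨a1, w1⟩ := st
    show _ = pvSweepB par (a1, w1) v
    by_cases hp : par v ≠ -1
    · simp only [pvSweepB, if_pos hp]
      congr 1
      congr 1
      rw [if_neg (show ¬ v = par v from fun h => hvv h.symm)]
    · simp only [pvSweepB, if_neg hp]

/- ---------- invariants of B's DFS loop ---------- -/

structure PvDfsInv (adj : Int → List Int) (stack order : List Int) (vis : Int → Bool) (par : Int → Int) : Prop where
  nodup : (order ++ stack).Nodup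
  vis_iff : ∀ i, vis i = true ↔ (i ∈ order ∨ i ∈ stack)
  par_mem : ∀ c, vis c = true → c ≠ 0 → par c ∈ order ∧ c ∈ adj (par c)
  par_idx : ∀ c ∈ order, c ≠ 0 → order.idxOf (par c) < order.idxOf c
  par_zero : par 0 = -1
  zero_vis : vis 0 = true
  done : ∀ v ∈ order, ∀ u ∈ adj v, vis u = true

structure PvDfsOut (adj : Int → List Int) (L : List Int) (vis : Int → Bool) (par : Int → Int) : Prop where
  nodup : L.Nodup
  vis_iff : ∀ i, vis i = true ↔ i ∈ L
  zero_mem : (0:Int) ∈ L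
  par_zero : par 0 = -1
  par_mem : ∀ c ∈ L, c ≠ 0 → par c ∈ L ∧ c ∈ adj (par c)
  par_idx : ∀ c ∈ L, c ≠ 0 → L.idxOf (par c) < L.idxOf c
  closed : ∀ v ∈ L, ∀ u ∈ adj v, u ∈ L

theorem pvInv_out {adj : Int → List Int} {order : List Int} {vis : Int → Bool} {par : Int → Int}
    (hinv : PvDfsInv adj [] order vis par) : PvDfsOut adj order vis par := by
  have hv : ∀ i, vis i = true ↔ i ∈ order := by
    intro i
    rw [hinv.vis_iff i]
    simp
  refine ⟨by simpa using hinv.nodup, hv, (hv 0).mp hinv.zero_vis, hinv.par_zero, ?_, hinv.par_idx, ?_⟩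
  · intro c hc h0
    have := hinv.par_mem c ((hv c).mpr hc) h0
    exact this
  · intro v hvm u hu
    exact (hv u).mp (hinv.done v hvm u hu)

theorem pvDfsB_inv (adj : Int → List Int) (U : Finset Int) (hU : ∀ v : Int, ∀ u ∈ adj v, u ∈ U) :
    ∀ (fuel : Nat) (stack : List Int) (vis : Int → Bool) (par : Int → Int) (order : List Int),
      PvDfsInv adj stack order vis par →
      stack.length + (U.filter (fun u => vis u = false)).card ≤ fuel →
      PvDfsOut adj (pvDfsB adj fuel stack vis par order).2.2
        (pvDfsB adj fuel stack vis par order).1 (pvDfsB adj fuel stack vis par order).2.1 := by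
  intro fuel
  induction fuel with
  | zero =>
    intro stack vis par order hinv hmsr
    have hstack : stack = [] := List.length_eq_zero_iff.mp (by omega)
    subst hstack
    exact pvInv_out hinv
  | succ fuel IHf =>
    intro stack vis par order hinv hmsr
    cases stack with
    | nil => exact pvInv_out hinv
    | cons v rest =>
      have hfold := pvFoldB_char v (adj v) rest vis par
      have hstep : pvDfsB adj (fuel+1) (v :: rest) vis par order
          = pvDfsB adj fuel ((adj v).foldl (pvStepB v) (rest, vis, par)).1
              ((adj v).foldl (pvStepB v) (rest, vis, par)).2.1
              ((adj v).foldl (pvStepB v) (rest, vis, par)).2.2 (order ++ [v]) := rfl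
      rw [hstep, hfold]
      obtain ⟨hnewsnd, hnewsmem, hnewscov⟩ := pvNews_spec (adj v) vis
      set news := pvNews vis (adj v) with hnews
      have hnd := hinv.nodup
      rw [List.nodup_append] at hnd
      obtain ⟨hordnd, hstknd, hdisj⟩ := hnd
      have hvvis : vis v = true := (hinv.vis_iff v).mpr (Or.inr (by simp))
      have hvord : v ∉ order := fun h => hdisj v h v (by simp) rfl
      have hvrest : v ∉ rest := (List.nodup_cons.mp hstknd).1
      have hrestnd : rest.Nodup := (List.nodup_cons.mp hstknd).2
      have hnews_unvis : ∀ u ∈ news, vis u = false := fun u hu => (hnewsmem u hu).1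
      have hnews_adj : ∀ u ∈ news, u ∈ adj v := fun u hu => (hnewsmem u hu).2
      have hnews_not : ∀ u ∈ news, u ∉ order ∧ u ∉ v :: rest := by
        intro u hu
        constructor
        · intro h
          have := (hinv.vis_iff u).mpr (Or.inl h)
          rw [hnews_unvis u hu] at this; exact absurd this (by simp)
        · intro h
          have := (hinv.vis_iff u).mpr (Or.inr h)
          rw [hnews_unvis u hu] at this; exact absurd this (by simp)
      have hinv' : PvDfsInv adj (news.reverse ++ rest) (order ++ [v])
          (fun i => vis i || decide (i ∈ news)) (fun i => if i ∈ news then v else par i) := by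
        refine ⟨?_, ?_, ?_, ?_, ?_, ?_, ?_⟩
        · -- nodup
          rw [List.nodup_append]
          refine ⟨?_, ?_, ?_⟩
          · rw [List.nodup_append]
            exact ⟨hordnd, List.nodup_singleton v,
              fun a ha b hb => by rw [List.mem_singleton.mp hb]; exact fun h => hvord (h ▸ ha)⟩
          · rw [List.nodup_append]
            refine ⟨List.nodup_reverse.mpr hnewsnd, hrestnd, ?_⟩
            intro a ha b hb
            rw [List.mem_reverse] at ha
            intro h
            exact (hnews_not a ha).2 (h ▸ List.mem_cons_of_mem _ hb)
          · intro a ha b hb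
            rcases List.mem_append.mp ha with haord | hav
            · rcases List.mem_append.mp hb with hbn | hbr
              · rw [List.mem_reverse] at hbn
                intro h
                exact (hnews_not b hbn).1 (h ▸ haord)
              · exact hdisj a haord b (List.mem_cons_of_mem _ hbr)
            · have hav' : a = v := List.mem_singleton.mp hav
              subst hav'
              rcases List.mem_append.mp hb with hbn | hbr
              · rw [List.mem_reverse] at hbn
                intro h
                rw [← h] at hbn
                rw [hnews_unvis a hbn] at hvvis
                exact absurd hvvis (by simp)
              · exact fun h => hvrest (h ▸ hbr)
        · -- vis_iff
          intro i
          have := hinv.vis_iff i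
          simp only [Bool.or_eq_true, decide_eq_true_eq, this, List.mem_append,
            List.mem_singleton, List.mem_cons, List.mem_reverse]
          tauto
        · -- par_mem
          intro c hc h0
          by_cases hcn : c ∈ news
          · rw [if_pos hcn]
            exact ⟨List.mem_append_right _ (by simp), hnews_adj c hcn⟩
          · rw [if_neg hcn]
            have hvc : vis c = true := by
              rcases Bool.or_eq_true_iff.mp hc with h | h
              · exact h
              · exact absurd (of_decide_eq_true h) hcn
            obtain ⟨h1, h2⟩ := hinv.par_mem c hvc h0
            exact ⟨List.mem_append_left _ h1, h2⟩
        · -- par_idx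
          intro c hcm h0
          rcases List.mem_append.mp hcm with hcord | hcv
          · have hvc : vis c = true := (hinv.vis_iff c).mpr (Or.inl hcord)
            have hcn : c ∉ news := by
              intro h; rw [hnews_unvis c h] at hvc; exact absurd hvc (by simp)
            rw [if_neg hcn]
            have hpord : par c ∈ order := (hinv.par_mem c hvc h0).1
            rw [List.idxOf_append, List.idxOf_append, if_pos hpord, if_pos hcord]
            exact hinv.par_idx c hcord h0
          · have hcv' : c = v := List.mem_singleton.mp hcv
            subst hcv'
            have hcn : c ∉ news := by
              intro h; rw [hnews_unvis c h] at hvvis; exact absurd hvvis (by simp)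
            rw [if_neg hcn]
            have hpord : par c ∈ order := (hinv.par_mem c hvvis h0).1
            rw [List.idxOf_append, List.idxOf_append, if_pos hpord, if_neg hvord]
            have h1 : order.idxOf (par c) < order.length := List.idxOf_lt_length_of_mem hpord
            omega
        · -- par_zero
          have h0n : (0:Int) ∉ news := by
            intro h
            have h1 := hnews_unvis 0 h
            rw [hinv.zero_vis] at h1
            exact absurd h1 (by simp)
          rw [if_neg h0n]
          exact hinv.par_zero
        · -- zero_vis
          simp [hinv.zero_vis]
        · -- done
          intro v' hv' u hu
          rcases List.mem_append.mp hv' with hvo | hvv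
          · have := hinv.done v' hvo u hu
            simp [this]
          · have : v' = v := List.mem_singleton.mp hvv
            subst this
            rcases hnewscov u hu with h | h
            · simp [h]
            · simp [h]
      have hmsr' : (news.reverse ++ rest).length
          + (U.filter (fun u => (vis u || decide (u ∈ news)) = false)).card ≤ fuel := by
        have hcardeq : U.filter (fun u => (vis u || decide (u ∈ news)) = false)
            = (U.filter (fun u => vis u = false)) \ news.toFinset := by
          ext u
          simp only [Finset.mem_filter, Finset.mem_sdiff, List.mem_toFinset,
            Bool.or_eq_false_iff, decide_eq_false_iff_not]
          tauto
        have hsubn : news.toFinset ⊆ U.filter (fun u => vis u = false) := by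
          intro u hu
          rw [List.mem_toFinset] at hu
          exact Finset.mem_filter.mpr ⟨hU v u (hnews_adj u hu), hnews_unvis u hu⟩
        have hcard : (U.filter (fun u => (vis u || decide (u ∈ news)) = false)).card
            = (U.filter (fun u => vis u = false)).card - news.length := by
          rw [hcardeq, Finset.card_sdiff]
          congr 1
          rw [Finset.inter_eq_left.mpr hsubn]
          exact List.toFinset_card_of_nodup hnewsnd
        have hle : news.length ≤ (U.filter (fun u => vis u = false)).card := by
          rw [← List.toFinset_card_of_nodup hnewsnd]
          exact Finset.card_le_card hsubn
        rw [hcard, List.length_append, List.length_reverse]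
        simp only [List.length_cons] at hmsr
        omega
      exact IHf _ _ _ _ hinv' hmsr'

/- ---------- A's DFS computes the same parent array as B's ---------- -/

theorem pvDfs_rel (adj : Int → List Int) :
    ∀ (fuel : Nat) (stack : List Int) (depth parA : Int → Int) (vis : Int → Bool)
      (parB : Int → Int) (order : List Int),
      (∀ i, vis i = !(depth i == -1)) → (∀ x ∈ stack, 0 ≤ depth x) → parA = parB →
      (pvDfsA adj fuel stack depth parA).2 = (pvDfsB adj fuel stack vis parB order).2.1 := by
  intro fuel
  induction fuel with
  | zero =>
    intro stack depth parA vis parB order _ _ hpar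
    exact hpar
  | succ fuel IHf =>
    intro stack depth parA vis parB order hvis hstk hpar
    cases stack with
    | nil => exact hpar
    | cons v rest =>
      have hv0 : 0 ≤ depth v := hstk v (by simp)
      have hstepA : pvDfsA adj (fuel+1) (v :: rest) depth parA
          = pvDfsA adj fuel ((adj v).foldl (pvStepA v) (rest, depth, parA)).1
              ((adj v).foldl (pvStepA v) (rest, depth, parA)).2.1
              ((adj v).foldl (pvStepA v) (rest, depth, parA)).2.2 := rfl
      have hstepB : pvDfsB adj (fuel+1) (v :: rest) vis parB order
          = pvDfsB adj fuel ((adj v).foldl (pvStepB v) (rest, vis, parB)).1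
              ((adj v).foldl (pvStepB v) (rest, vis, parB)).2.1
              ((adj v).foldl (pvStepB v) (rest, vis, parB)).2.2 (order ++ [v]) := rfl
      rw [hstepA, hstepB, pvFoldA_char v (adj v) rest depth parA hv0, pvFoldB_char v (adj v) rest vis parB]
      have hnews : pvNews vis (adj v) = pvNews (fun i => !(depth i == -1)) (adj v) :=
        pvNews_congr _ _ _ hvis
      rw [← hnews]
      obtain ⟨hnewsnd, hnewsmem, _⟩ := pvNews_spec (adj v) vis
      apply IHf
      · intro i
        show (vis i || decide (i ∈ pvNews vis (adj v)))
            = !((if i ∈ pvNews vis (adj v) then depth v + 1 else depth i) == -1)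
        by_cases hi : i ∈ pvNews vis (adj v)
        · rw [if_pos hi]
          have hne : (depth v + 1 == -1) = false := by
            simp
            omega
          simp [hi, hne]
        · rw [if_neg hi]
          simp only [hi, decide_false, Bool.or_false]
          exact hvis i
      · intro x hx
        show 0 ≤ (if x ∈ pvNews vis (adj v) then depth v + 1 else depth x)
        rcases List.mem_append.mp hx with hxn | hxr
        · rw [List.mem_reverse] at hxn
          rw [if_pos hxn]
          omega
        · have hxd : 0 ≤ depth x := hstk x (by simp [hxr])
          have hxn : x ∉ pvNews vis (adj v) := by
            intro h
            have h1 := (hnewsmem x h).1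
            rw [hvis x] at h1
            simp at h1
            omega
          rw [if_neg hxn]
          exact hxd
      · show (fun i => if i ∈ pvNews vis (adj v) then v else parA i)
            = (fun i => if i ∈ pvNews vis (adj v) then v else parB i)
        rw [hpar]

/- ---------- the adjacency build ---------- -/

theorem pvBuildAdj_count (edges : List (Int × Int)) (he : ∀ e ∈ edges, e.1 ≠ e.2) (v c : Int) :
    List.count c (pvBuildAdj edges v)
      = edges.countP (fun e => (decide (e.1 = v) && decide (e.2 = c))
          || (decide (e.1 = c) && decide (e.2 = v))) := by
  have gen : ∀ (es : List (Int × Int)), (∀ e ∈ es, e.1 ≠ e.2) → ∀ (adj0 : Int → List Int),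
      List.count c ((es.foldl (fun adj e =>
        let adj1 : Int → List Int := fun i => if i = e.1 then adj i ++ [e.2] else adj i
        fun i => if i = e.2 then adj1 i ++ [e.1] else adj1 i) adj0) v)
      = List.count c (adj0 v) + es.countP (fun e => (decide (e.1 = v) && decide (e.2 = c))
          || (decide (e.1 = c) && decide (e.2 = v))) := by
    intro es
    induction es with
    | nil => intro _ adj0; simp
    | cons e es IH =>
      intro hes adj0
      rw [List.foldl_cons, IH (fun e' he' => hes e' (by simp [he'])), List.countP_cons]
      beta_reduce
      have he1 : e.1 ≠ e.2 := hes e (by simp)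
      by_cases h2 : v = e.2 <;> by_cases h1 : v = e.1
      · exact absurd (h1.symm.trans h2) he1
      · have hpred : ((decide (e.1 = v) && decide (e.2 = c)) || (decide (e.1 = c) && decide (e.2 = v)))
            = decide (e.1 = c) := by
          have hne : ¬ e.1 = v := fun h => h1 (h ▸ rfl)
          simp [hne, h2.symm]
        rw [if_pos h2, if_neg h1, List.count_append, hpred]
        by_cases hc : e.1 = c <;> simp [hc] <;> omega
      · have hpred : ((decide (e.1 = v) && decide (e.2 = c)) || (decide (e.1 = c) && decide (e.2 = v)))
            = decide (e.2 = c) := by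
          have hne : ¬ e.2 = v := fun h => h2 (h ▸ rfl)
          simp [hne, h1.symm]
        rw [if_neg h2, if_pos h1, List.count_append, hpred]
        by_cases hc : e.2 = c <;> simp [hc] <;> omega
      · rw [if_neg h2, if_neg h1]
        have hpred : ((decide (e.1 = v) && decide (e.2 = c)) || (decide (e.1 = c) && decide (e.2 = v)))
            = false := by
          have hx : ¬ e.1 = v := fun h => h1 (h ▸ rfl)
          have hy : ¬ e.2 = v := fun h => h2 (h ▸ rfl)
          simp [hx, hy]
        rw [hpred]
        simp
  rw [pvBuildAdj, gen edges he]
  simp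

/- ---------- instantiation: the DFS output on a tree input ---------- -/

-- A's pruned children lists (the enumerate/remove pass), as a function
def pvChA (adj : Int → List Int) (par : Int → Int) (v : Int) : List Int :=
  if par v ≠ -1 then (PySem.List.remove? (adj v) (par v)).getD (adj v) else adj v

theorem pvTreeFacts (a : List Int) (edges : List (Int × Int))
    (hn1 : 1 ≤ a.length) (hlen : edges.length + 1 = a.length)
    (hvalid : ∀ e ∈ edges, 0 ≤ e.1 ∧ e.1 < (a.length:Int) ∧ 0 ≤ e.2 ∧ e.2 < (a.length:Int) ∧ e.1 ≠ e.2)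
    (hconn : ∀ S ∈ (Finset.range a.length).powerset, 0 ∈ S →
      (∀ e ∈ edges, (e.1.toNat ∈ S ↔ e.2.toNat ∈ S)) → ∀ v ∈ Finset.range a.length, v ∈ S)
    (L : List Int) (vis : Int → Bool) (par : Int → Int)
    (hout : PvDfsOut (pvBuildAdj edges) L vis par) :
    PvTreeH par L ∧ L.length ≤ a.length ∧
    (∀ v ∈ L, ∀ c, c ∈ pvChA (pvBuildAdj edges) par v ↔ (c ∈ L ∧ c ≠ 0 ∧ par c = v)) ∧
    (∀ v ∈ L, (pvChA (pvBuildAdj edges) par v).Nodup) := by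
  set n := a.length with hn
  set adj := pvBuildAdj edges with hadj
  have he : ∀ e ∈ edges, e.1 ≠ e.2 := fun e hemem => (hvalid e hemem).2.2.2.2
  -- membership in an adjacency list comes from an edge
  have hmem_edge : ∀ v c : Int, c ∈ adj v →
      ∃ e ∈ edges, (e.1 = v ∧ e.2 = c) ∨ (e.1 = c ∧ e.2 = v) := by
    intro v c hc
    have h1 : 0 < List.count c (adj v) := List.count_pos_iff.mpr hc
    rw [pvBuildAdj_count edges he v c] at h1
    obtain ⟨e, hemem, hpred⟩ := List.countP_pos_iff.mp h1
    refine ⟨e, hemem, ?_⟩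
    rcases Bool.or_eq_true_iff.mp hpred with h | h <;>
      [left; right] <;>
      exact ⟨of_decide_eq_true (Bool.and_eq_true_iff.mp h).1,
        of_decide_eq_true (Bool.and_eq_true_iff.mp h).2⟩
  have hedge_mem : ∀ e ∈ edges, e.2 ∈ adj e.1 ∧ e.1 ∈ adj e.2 := by
    intro e hemem
    constructor
    · apply List.count_pos_iff.mp
      rw [pvBuildAdj_count edges he]
      apply List.countP_pos_iff.mpr
      exact ⟨e, hemem, by simp⟩
    · apply List.count_pos_iff.mp
      rw [pvBuildAdj_count edges he]
      apply List.countP_pos_iff.mpr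
      exact ⟨e, hemem, by simp⟩
  -- every listed node is in range
  have hrange : ∀ c ∈ L, 0 ≤ c ∧ c < (n:Int) := by
    intro c hc
    by_cases h0 : c = 0
    · subst h0; constructor; · rfl
      · have : (0:Int) < (n:Int) := by exact_mod_cast hn1
        simpa using this
    · obtain ⟨hpL, hcadj⟩ := hout.par_mem c hc h0
      obtain ⟨e, hemem, hcase⟩ := hmem_edge (par c) c hcadj
      obtain ⟨h1, h2, h3, h4, _⟩ := hvalid e hemem
      rcases hcase with ⟨_, hb⟩ | ⟨ha, _⟩
      · rw [← hb]; exact ⟨h3, h4⟩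
      · rw [← ha]; exact ⟨h1, h2⟩
  have hneg : (-1:Int) ∉ L := by
    intro h
    have := (hrange _ h).1
    omega
  have H : PvTreeH par L :=
    ⟨hout.nodup, hout.zero_mem, hneg, hout.par_zero,
     fun c hc h0 => ⟨(hout.par_mem c hc h0).1, hout.par_idx c hc h0⟩⟩
  have hlenle : L.length ≤ n := by
    have h1 : L.toFinset ⊆ (Finset.range n).image (fun k : ℕ => (k : Int)) := by
      intro c hc
      rw [List.mem_toFinset] at hc
      obtain ⟨hc0, hcn⟩ := hrange c hc
      exact Finset.mem_image.mpr ⟨c.toNat, Finset.mem_range.mpr (by omega), by omega⟩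
    calc L.length = L.toFinset.card := (List.toFinset_card_of_nodup hout.nodup).symm
      _ ≤ ((Finset.range n).image (fun k : ℕ => (k : Int))).card := Finset.card_le_card h1
      _ ≤ (Finset.range n).card := Finset.card_image_le
      _ = n := Finset.card_range n
  have hlenge : n ≤ L.length := by
    have hmemiff : ∀ x : Int, 0 ≤ x → (x.toNat ∈ (L.map Int.toNat).toFinset ↔ x ∈ L) := by
      intro x hx
      rw [List.mem_toFinset, List.mem_map]
      constructor
      · rintro ⟨c, hcL, hceq⟩
        have hc0 := (hrange c hcL).1
        have hcx : c = x := by omega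
        rwa [← hcx]
      · intro hx'
        exact ⟨x, hx', rfl⟩
    have hS : ∀ v ∈ Finset.range n, v ∈ (L.map Int.toNat).toFinset := by
      apply hconn
      · rw [Finset.mem_powerset]
        intro u hu
        rw [List.mem_toFinset, List.mem_map] at hu
        obtain ⟨c, hcL, rfl⟩ := hu
        obtain ⟨h0, h1⟩ := hrange c hcL
        exact Finset.mem_range.mpr (by omega)
      · rw [show (0:ℕ) = (0:Int).toNat from rfl, hmemiff 0 le_rfl]
        exact hout.zero_mem
      · intro e hemem
        obtain ⟨h1, h2, h3, h4, _⟩ := hvalid e hemem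
        rw [hmemiff e.1 h1, hmemiff e.2 h3]
        constructor
        · intro h; exact hout.closed e.1 h e.2 (hedge_mem e hemem).1
        · intro h; exact hout.closed e.2 h e.1 (hedge_mem e hemem).2
    calc n = (Finset.range n).card := (Finset.card_range n).symm
      _ ≤ (L.map Int.toNat).toFinset.card := Finset.card_le_card (fun v hv => hS v hv)
      _ ≤ (L.map Int.toNat).length := List.toFinset_card_le _
      _ = L.length := List.length_map ..
  have hlenL : L.length = n := le_antisymm hlenle hlenge
  -- no node is its own grandparent
  have hnoflip : ∀ v ∈ L, v ≠ 0 → par (par v) ≠ v := by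
    intro v hv h0 hflip
    by_cases hp0 : par v = 0
    · rw [hp0, H.par_zero] at hflip
      exact hneg (hflip ▸ hv)
    · have hb1 := (H.before v hv h0).2
      have hpL := (H.before v hv h0).1
      have hb2 := (H.before (par v) hpL hp0).2
      rw [hflip] at hb2
      omega
  -- the multiset of parent edges equals the multiset of input edges
  have hMTnd : ((L.filter (fun c => decide (c ≠ 0))).map (fun c => s(par c, c))).Nodup := by
    apply List.Nodup.map_on ?_ (hout.nodup.filter _)
    intro x hx y hy hxy
    rw [List.mem_filter] at hx hy
    have hx0 : x ≠ 0 := by simpa using hx.2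
    have hy0 : y ≠ 0 := by simpa using hy.2
    rcases Sym2.eq_iff.mp hxy with ⟨_, hcc⟩ | ⟨hpc, hcp⟩
    · exact hcc
    · exfalso
      have hbx := (H.before x hx.1 hx0).2
      have hby := (H.before y hy.1 hy0).2
      rw [hpc] at hbx
      rw [← hcp] at hby
      omega
  have hperm : ((L.filter (fun c => decide (c ≠ 0))).map (fun c => s(par c, c))).Perm
      (edges.map (fun e => s(e.1, e.2))) := by
    have hsub : ((L.filter (fun c => decide (c ≠ 0))).map (fun c => s(par c, c)))
        ⊆ edges.map (fun e => s(e.1, e.2)) := by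
      intro x hx
      rw [List.mem_map] at hx
      obtain ⟨c, hcf, rfl⟩ := hx
      rw [List.mem_filter] at hcf
      have hc0 : c ≠ 0 := by simpa using hcf.2
      obtain ⟨hpL, hcadj⟩ := hout.par_mem c hcf.1 hc0
      obtain ⟨e, hemem, hcase⟩ := hmem_edge (par c) c hcadj
      rw [List.mem_map]
      refine ⟨e, hemem, ?_⟩
      rcases hcase with ⟨ha, hb⟩ | ⟨ha, hb⟩
      · rw [ha, hb]
      · rw [ha, hb]; exact Sym2.eq_swap
    have hflen : (L.filter (fun c => decide (c ≠ 0))).length = L.length - 1 := by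
      have herase : L.erase 0 = L.filter (fun c => decide (c ≠ 0)) := by
        rw [List.Nodup.erase_eq_filter hout.nodup 0]
        apply List.filter_congr
        intro c _
        simp only [bne]
        by_cases hc : c = 0 <;> simp [hc]
      rw [← herase, List.length_erase_of_mem hout.zero_mem]
    apply (hMTnd.subperm hsub).perm_of_length_le
    rw [List.length_map, List.length_map, hflen, hlenL]
    omega
  -- adjacency counts through the Sym2 multiset
  have hadjMT : ∀ v c : Int, List.count c (adj v)
      = List.count (s(v,c)) ((L.filter (fun c => decide (c ≠ 0))).map (fun c => s(par c, c))) := by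
    intro v c
    rw [pvBuildAdj_count edges he v c, hperm.count_eq (s(v,c)),
      List.count_eq_countP, List.countP_map]
    apply List.countP_congr
    intro e _
    show ((decide (e.1 = v) && decide (e.2 = c)) || (decide (e.1 = c) && decide (e.2 = v))) = true
      ↔ (s(e.1, e.2) == s(v, c)) = true
    rw [beq_iff_eq, Sym2.eq_iff]
    simp
  -- counting the parent-edge multiset
  have hMTc : ∀ v c : Int, List.count (s(v,c))
        ((L.filter (fun c => decide (c ≠ 0))).map (fun c => s(par c, c)))
      = ((L.filter (fun c => decide (c ≠ 0))).countP
          (fun c' => decide ((par c' = v ∧ c' = c) ∨ (par c' = c ∧ c' = v)))) := by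
    intro v c
    rw [List.count_eq_countP, List.countP_map]
    apply List.countP_congr
    intro c' _
    show (s(par c', c') == s(v, c)) = true ↔ _
    rw [beq_iff_eq, Sym2.eq_iff]
    simp
  -- (Ka): each tree child appears exactly once in its parent's adjacency list
  have hKa : ∀ c ∈ L, c ≠ 0 → List.count c (adj (par c)) = 1 := by
    intro c hc h0
    have hle : List.count (s(par c,c))
        ((L.filter (fun x => decide (x ≠ 0))).map (fun x => s(par x, x))) ≤ 1 :=
      List.nodup_iff_count_le_one.mp hMTnd _
    have hge : 0 < List.count (s(par c,c))
        ((L.filter (fun x => decide (x ≠ 0))).map (fun x => s(par x, x))) := by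
      apply List.count_pos_iff.mpr
      rw [List.mem_map]
      exact ⟨c, List.mem_filter.mpr ⟨hc, by simpa using h0⟩, rfl⟩
    have := hadjMT (par c) c
    omega
  -- (Kc): anything on an adjacency list of a listed node is explained by a parent edge
  have hKc : ∀ v ∈ L, ∀ c, c ∈ adj v →
      (c ∈ L ∧ c ≠ 0 ∧ par c = v) ∨ (v ≠ 0 ∧ par v = c) := by
    intro v hv c hcadj
    have hpos : 0 < List.count (s(v,c))
        ((L.filter (fun x => decide (x ≠ 0))).map (fun x => s(par x, x))) := by
      rw [← hadjMT]
      exact List.count_pos_iff.mpr hcadj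
    have hmem := List.count_pos_iff.mp hpos
    rw [List.mem_map] at hmem
    obtain ⟨c', hc'f, hc'eq⟩ := hmem
    rw [List.mem_filter] at hc'f
    have hc'0 : c' ≠ 0 := by simpa using hc'f.2
    rcases Sym2.eq_iff.mp hc'eq with ⟨ha, hb⟩ | ⟨ha, hb⟩
    · left
      rw [← hb]
      exact ⟨hc'f.1, hc'0, ha⟩
    · right
      rw [← hb]
      exact ⟨hc'0, ha.symm ▸ rfl⟩
  -- counts are at most one everywhere on listed nodes
  have hK1 : ∀ v ∈ L, ∀ c, List.count c (adj v) ≤ 1 := by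
    intro v hv c
    rw [hadjMT v c]
    exact List.nodup_iff_count_le_one.mp hMTnd _
  have hch : (∀ v ∈ L, ∀ c, c ∈ pvChA adj par v ↔ (c ∈ L ∧ c ≠ 0 ∧ par c = v)) ∧
      (∀ v ∈ L, (pvChA adj par v).Nodup) := by
    have hchspec : ∀ v ∈ L, ∀ c, (c ∈ pvChA adj par v ↔ (c ∈ L ∧ c ≠ 0 ∧ par c = v)) := by
      intro v hv c
      by_cases h0 : v = 0
      · subst h0
        have hch0 : pvChA adj par 0 = adj 0 := by
          rw [pvChA, H.par_zero]
          simp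
        rw [hch0]
        constructor
        · intro hc
          rcases hKc 0 hv c hc with h | h
          · exact h
          · exact absurd rfl h.1
        · rintro ⟨hcL, hc0, hpc⟩
          apply List.count_pos_iff.mp
          rw [← hpc] at *
          rw [hKa c hcL hc0]
          omega
      · have hpv : par v ≠ -1 := pvTreeH_par_ne_neg_one H hv h0
        have hpvadj : par v ∈ adj v := by
          apply List.count_pos_iff.mp
          have h1 := hKa v hv h0
          have h2 := hadjMT v (par v)
          have h3 := hadjMT (par v) v
          -- count (par v) (adj v) = count s(v, par v) MT = count s(par v, v) MT = 1
          rw [h2, show s(v, par v) = s(par v, v) from Sym2.eq_swap, ← h3, h1]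
          omega
        have hchv : pvChA adj par v = (adj v).erase (par v) := by
          rw [pvChA, if_pos hpv, PySem.List.remove?_eq_some_erase (adj v) (par v) hpvadj]
          rfl
        rw [hchv]
        by_cases hcp : c = par v
        · subst hcp
          constructor
          · intro hmem
            exfalso
            have hcnt := List.count_erase (a := par v) (b := par v) (l := adj v)
            have hle := hK1 v hv (par v)
            have hpos := List.count_pos_iff.mpr hmem
            rw [hcnt] at hpos
            simp at hpos
            have hpos2 := List.count_pos_iff.mpr hpvadj
            omega
          · rintro ⟨hcL, hc0, hpc⟩
            exact absurd hpc (hnoflip v hv h0)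
        · constructor
          · intro hmem
            have hmem' : c ∈ adj v := List.mem_of_mem_erase hmem
            rcases hKc v hv c hmem' with h | h
            · exact h
            · exact absurd h.2.symm hcp
          · rintro ⟨hcL, hc0, hpc⟩
            apply (List.mem_erase_of_ne hcp).mpr
            apply List.count_pos_iff.mp
            rw [← hpc] at *
            rw [hKa c hcL hc0]
            omega
    refine ⟨hchspec, ?_⟩
    intro v hv
    rw [List.nodup_iff_count_le_one]
    intro c
    by_cases hc : c ∈ pvChA adj par v
    · obtain ⟨hcL, hc0, hpc⟩ := (hchspec v hv c).mp hc
      have h1 := hK1 v hv c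
      have h2 : List.count c (pvChA adj par v) ≤ List.count c (adj v) := by
        rw [pvChA]
        by_cases hp : par v ≠ -1
        · rw [if_pos hp]
          rcases h : PySem.List.remove? (adj v) (par v) with _ | l
          · simp
          · have hm : par v ∈ adj v := by
              by_contra hnm
              rw [(PySem.List.remove?_eq_none_iff (adj v) (par v)).mpr hnm] at h
              cases h
            rw [PySem.List.remove?_eq_some_erase (adj v) (par v) hm] at h
            cases h
            simp only [Option.getD_some]
            rw [List.count_erase]
            omega
        · rw [if_neg hp]
      omega
    · rw [List.count_eq_zero_of_not_mem hc]
      omega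
  exact ⟨H, hlenle, hch.1, hch.2⟩

theorem pvFlatLen : ∀ (edges : List (Int × Int)),
    (edges.flatMap (fun e => [e.1, e.2])).length = 2 * edges.length := by
  intro edges
  induction edges with
  | nil => simp
  | cons e es IH =>
    rw [List.flatMap_cons, List.length_append, IH]
    simp
    omega

-- ===== VERDICT (by name: the statement is the Claim_ definition above) =====
theorem solution_spec : Claim_equal_solution := by
  intro a edges _ hpre
  unfold Spec_solution
  by_cases hsum : a.sum ≠ 0
  · unfold solution solution_alt
    rw [if_pos hsum, if_pos hsum]
  · rcases hpre with h | ⟨hn1, hlen, hvalid, hconn⟩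
    · exact absurd h hsum
    have he : ∀ e ∈ edges, e.1 ≠ e.2 := fun e hm => (hvalid e hm).2.2.2.2
    -- B's DFS: run the invariant machinery
    have hUadj : ∀ v : Int, ∀ u ∈ pvBuildAdj edges v,
        u ∈ (edges.flatMap (fun e => [e.1, e.2])).toFinset := by
      intro v u hu
      have h1 : 0 < List.count u (pvBuildAdj edges v) := List.count_pos_iff.mpr hu
      rw [pvBuildAdj_count edges he v u] at h1
      obtain ⟨e, hemem, hpredd⟩ := List.countP_pos_iff.mp h1
      rw [List.mem_toFinset, List.mem_flatMap]
      refine ⟨e, hemem, ?_⟩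
      rcases Bool.or_eq_true_iff.mp hpredd with h | h
      · have := of_decide_eq_true (Bool.and_eq_true_iff.mp h).2
        simp [← this]
      · have := of_decide_eq_true (Bool.and_eq_true_iff.mp h).1
        simp [← this]
    have hinv0 : PvDfsInv (pvBuildAdj edges) [0] [] (fun i => i == 0) (fun _ => -1) := by
      refine ⟨by simp, ?_, ?_, by simp, rfl, by simp, by simp⟩
      · intro i
        constructor
        · intro h
          exact Or.inr (by simpa using h)
        · intro h
          rcases h with h | h
          · simp at h
          · simp [by simpa using h]
      · intro c hc h0
        exact absurd (by simpa using hc) h0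
    have hmsr0 : ([0] : List Int).length
        + (((edges.flatMap (fun e => [e.1, e.2])).toFinset).filter
            (fun u => (u == (0:Int)) = false)).card
        ≤ a.length + 2 * edges.length + 1 := by
      have hflen := pvFlatLen edges
      have h1 : (((edges.flatMap (fun e => [e.1, e.2])).toFinset).filter
          (fun u => (u == (0:Int)) = false)).card
          ≤ (edges.flatMap (fun e => [e.1, e.2])).toFinset.card := Finset.card_filter_le _ _
      have h2 := List.toFinset_card_le (edges.flatMap (fun e => [e.1, e.2]))
      simp only [List.length_cons, List.length_nil]
      omega
    have hout := pvDfsB_inv (pvBuildAdj edges) _ hUadj (a.length + 2 * edges.length + 1)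
      [0] (fun i => i == 0) (fun _ => -1) [] hinv0 hmsr0
    obtain ⟨H, hlenle, Hch, Hchnd⟩ := pvTreeFacts a edges hn1 hlen hvalid hconn _ _ _ hout
    -- names for the DFS results
    generalize hgen : (pvDfsB (pvBuildAdj edges) (a.length + 2 * edges.length + 1)
        [0] (fun i => i == 0) (fun _ => -1) []) = res at *
    obtain ⟨vis, par, L⟩ := res
    dsimp only at hout H hlenle Hch Hchnd
    -- A's DFS computes the same parent function
    have hrel1 : ∀ i : Int, ((i == (0:Int)) : Bool) = !((if i = 0 then (0:Int) else -1) == -1) := by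
      intro i
      by_cases hi : i = 0 <;> simp [hi]
    have hrel2 : ∀ x ∈ ([0] : List Int), (0:Int) ≤ (if x = 0 then (0:Int) else -1) := by
      intro x hx
      have hx0 : x = 0 := by simpa using hx
      simp [hx0]
    have hABeq : (pvDfsA (pvBuildAdj edges) (a.length + 2 * edges.length + 1) [0]
        (fun i => if i = 0 then 0 else -1) (fun _ => -1)).2 = par := by
      have h := pvDfs_rel (pvBuildAdj edges) (a.length + 2 * edges.length + 1) [0]
        (fun i => if i = 0 then 0 else -1) (fun _ => -1) (fun i => i == 0) (fun _ => -1) []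
        hrel1 hrel2 rfl
      rw [hgen] at h
      exact h
    have hA0 : solution a edges
        = (if a.sum ≠ 0 then (-1:Int) else
            (pvCalcA (pvChA (pvBuildAdj edges)
                ((pvDfsA (pvBuildAdj edges) (a.length + 2 * edges.length + 1) [0]
                  (fun i => if i = 0 then 0 else -1) (fun _ => -1)).2))
              ((pvDfsA (pvBuildAdj edges) (a.length + 2 * edges.length + 1) [0]
                  (fun i => if i = 0 then 0 else -1) (fun _ => -1)).2)
              (a.length + 1) (fun i => (PySem.List.pyGet? a i).getD 0) 0).1) := rfl
    have hA : solution a edges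
        = (pvCalcA (pvChA (pvBuildAdj edges) par) par (a.length + 1)
            (fun i => (PySem.List.pyGet? a i).getD 0) 0).1 := by
      rw [hA0, if_neg hsum, hABeq]
    have hB0 : solution_alt a edges
        = (if a.sum ≠ 0 then (-1:Int) else
            (((pvDfsB (pvBuildAdj edges) (a.length + 2 * edges.length + 1) [0]
                (fun i => i == 0) (fun _ => -1) []).2.2).reverse.foldl
              (pvSweepB ((pvDfsB (pvBuildAdj edges) (a.length + 2 * edges.length + 1) [0]
                (fun i => i == 0) (fun _ => -1) []).2.1))
              (0, fun i => (PySem.List.pyGet? a i).getD 0)).1) := rfl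
    have hB : solution_alt a edges
        = (L.reverse.foldl (pvSweepB par) (0, fun i => (PySem.List.pyGet? a i).getD 0)).1 := by
      rw [hB0, if_neg hsum, hgen]
    -- A's side: calc = sweep over the post-order
    have hneS : ∀ u ∈ pvPost (pvChA (pvBuildAdj edges) par) (a.length + 1) 0, par u ≠ u := by
      intro u hu
      exact pvTreeH_par_ne_self H (pvPost_sub Hch (a.length+1) 0 H.zero_mem u hu)
    have hcalc := pvCalc_eq_fold (pvChA (pvBuildAdj edges) par) par (a.length+1)
      (fun i => (PySem.List.pyGet? a i).getD 0) 0 hneS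
    have hidx0 : L.idxOf 0 < L.length := List.idxOf_lt_length_of_mem H.zero_mem
    have hstab : pvPost (pvChA (pvBuildAdj edges) par) (a.length+1) 0
        = pvPost (pvChA (pvBuildAdj edges) par) L.length 0 :=
      pvPost_stab H Hch (L.length - L.idxOf 0) 0 H.zero_mem le_rfl (a.length+1) L.length
        (by omega) (by omega)
    have hRnd := pvPost_nodup H Hch Hchnd L.length 0 H.zero_mem
    have hRsub : ∀ u ∈ pvPost (pvChA (pvBuildAdj edges) par) L.length 0, u ∈ L :=
      fun u hu => pvPost_sub Hch L.length 0 H.zero_mem u hu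
    have hRcover : ∀ u ∈ L, u ∈ pvPost (pvChA (pvBuildAdj edges) par) L.length 0 :=
      fun u hu => pvPost_cover H Hch u hu L.length le_rfl
    have hgoodA : ∀ v ∈ pvPost (pvChA (pvBuildAdj edges) par) L.length 0, ∀ c ∈ L, c ≠ 0 → par c = v →
        (c ∈ ([]:List Int) ∨ ∃ X Y, pvPost (pvChA (pvBuildAdj edges) par) L.length 0 = X ++ v :: Y ∧ c ∈ X) := by
      intro v hv c hcL hc0 hpc
      right
      exact pvPost_before H Hch L.length 0 H.zero_mem v c
        ((Hch v (hRsub v hv) c).mpr ⟨hcL, hc0, hpc⟩) hv (hRcover c hcL)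
    have hsweepA := pvSweep_go (w0 := fun i => (PySem.List.pyGet? a i).getD 0) H
      (pvPost (pvChA (pvBuildAdj edges) par) L.length 0) [] 0
      (by simpa using hRnd) (by simpa using hRsub) hgoodA
    rw [pvWOf_nil] at hsweepA
    have hAval : solution a edges
        = ((pvPost (pvChA (pvBuildAdj edges) par) L.length 0).map
            (fun v => |pvS (fun i => (PySem.List.pyGet? a i).getD 0) par L L.length v|)).sum := by
      rw [hA, hcalc, hstab, hsweepA]
      simp
    -- B's side: the reverse sweep
    have hgoodB : ∀ v ∈ L.reverse, ∀ c ∈ L, c ≠ 0 → par c = v →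
        (c ∈ ([]:List Int) ∨ ∃ X Y, L.reverse = X ++ v :: Y ∧ c ∈ X) := by
      intro v hv c hcL hc0 hpc
      right
      rw [List.mem_reverse] at hv
      have hb := (H.before c hcL hc0).2
      rw [hpc] at hb
      exact pv_dec_rev L v c hv hcL hb
    have hsweepB := pvSweep_go (w0 := fun i => (PySem.List.pyGet? a i).getD 0) H
      L.reverse [] 0
      (by simpa using List.nodup_reverse.mpr H.nodup)
      (by intro v hv; rw [← List.mem_reverse]; simpa using hv) hgoodB
    rw [pvWOf_nil] at hsweepB
    have hBval : solution_alt a edges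
        = (L.reverse.map
            (fun v => |pvS (fun i => (PySem.List.pyGet? a i).getD 0) par L L.length v|)).sum := by
      rw [hB, hsweepB]
      simp
    rw [hAval, hBval]
    apply List.Perm.sum_eq
    apply List.Perm.map
    apply List.perm_of_nodup_nodup_toFinset_eq hRnd (List.nodup_reverse.mpr H.nodup)
    ext x
    simp only [List.mem_toFinset, List.mem_reverse]
    exact ⟨fun h => hRsub x h, fun h => hRcover x h⟩
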